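-- pv_equiv track=rewrite | github.com/Project-KONDA/data-value-clustering | DataValueClustering/gui/clustering.py | fancy_cluster_representation
-- ===== SOURCE A (Python) =====
-- def fancy_cluster_representation(values, clusters):
--     no_clusters = max(clusters) + 1
--     outer_list = list()
--     noise = list()
--
--     for i in range(no_clusters):
--         outer_list.append(list())
--
--     for j in range(len(values)):
--         x = int(clusters[j])
--         if x >=0:
--             outer_list[x].append(values[j])
--         else:
--             noise.append(values[j])
--
--     return outer_list, noise
-- ===== SOURCE B (Python) =====
-- def fancy_cluster_representation(values, clusters):
--     no_clusters = max(clusters) + 1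
--     outer_list = [[values[j] for j in range(len(values)) if int(clusters[j]) == i]
--                   for i in range(no_clusters)]
--     noise = [values[j] for j in range(len(values)) if int(clusters[j]) < 0]
--     return outer_list, noise
-- ===== Notes on version B (the rewrite author's own statement) =====
-- stated objective: simpler
-- what changed: Replaces the single mutating bucketing pass (pre-allocated outer lists, in-place appends indexed by cluster id) with one values-scan per cluster index via nested comprehensions plus a separate scan for noise.
import Mathlib
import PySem

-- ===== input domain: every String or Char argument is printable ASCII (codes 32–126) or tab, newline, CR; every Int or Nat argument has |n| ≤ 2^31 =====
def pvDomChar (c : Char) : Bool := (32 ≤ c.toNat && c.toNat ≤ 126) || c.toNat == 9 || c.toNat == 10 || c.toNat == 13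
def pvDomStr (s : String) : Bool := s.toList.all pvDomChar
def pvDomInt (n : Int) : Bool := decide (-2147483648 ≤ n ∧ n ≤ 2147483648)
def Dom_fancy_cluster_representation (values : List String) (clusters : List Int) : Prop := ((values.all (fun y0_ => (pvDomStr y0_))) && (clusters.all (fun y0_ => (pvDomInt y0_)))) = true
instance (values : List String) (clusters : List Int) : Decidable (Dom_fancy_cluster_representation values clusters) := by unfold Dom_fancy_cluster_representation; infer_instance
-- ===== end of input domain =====

-- B replaces A's single mutating bucketing pass (pre-allocated lists, in-place
-- indexed appends) with one comprehension scan per cluster index plus a separate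
-- noise scan: simpler, no mutation. Equivalence proved on Pre_ (where A returns).

-- ===== PORT A =====
-- outer_list[x].append(v) : append v to the x-th inner list (in-range under Pre_)
def pvAppendAt : List (List String) → Nat → String → List (List String)
  | [], _, _ => []
  | l :: ls, 0, v => (l ++ [v]) :: ls
  | l :: ls, n+1, v => l :: pvAppendAt ls n v

-- 'for i in range(no_clusters): outer_list.append(list())'
def pvInitA (nc : Nat) : List (List String) :=
  (List.range nc).foldl (fun acc _ => acc ++ [([] : List String)]) []

-- body of 'for j in range(len(values))'; getD is exact since Pre_ gives j < len(clusters), len(values)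
def pvStepA (values : List String) (clusters : List Int)
    (st : List (List String) × List String) (j : Nat) : List (List String) × List String :=
  let x := clusters.getD j 0
  if 0 ≤ x then (pvAppendAt st.1 x.toNat (values.getD j ""), st.2)
  else (st.1, st.2 ++ [values.getD j ""])

def fancy_cluster_representation (values : List String) (clusters : List Int) :
    List (List String) × List String :=
  match PySem.List.max? clusters (fun x => x) with
  | none => ([], [])  -- Python: max([]) raises ValueError; excluded by Pre_
  | some m =>
    let nc := (m + 1).toNat  -- range(no_clusters); exact (range of a negative bound is empty)
    (List.range values.length).foldl (pvStepA values clusters) (pvInitA nc, [])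

-- ===== PORT B =====
def fancy_cluster_representation_alt (values : List String) (clusters : List Int) :
    List (List String) × List String :=
  match PySem.List.max? clusters (fun x => x) with
  | none => ([], [])  -- Python: max([]) raises ValueError; excluded by Pre_
  | some m =>
    let nc := (m + 1).toNat
    (((List.range nc)).map (fun (i : Nat) =>
        ((List.range values.length).filter
            (fun j => clusters.getD j 0 == (i : Int))).map (fun j => values.getD j "")),
     ((List.range values.length).filter
         (fun j => decide (clusters.getD j 0 < 0))).map (fun j => values.getD j ""))

-- ===== PRECONDITION & SPEC =====
-- Pre_ excludes exactly the inputs where A raises: empty clusters (ValueError from max)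
-- and len(values) > len(clusters) (IndexError on clusters[j]); B raises there too.
def Pre_fancy_cluster_representation (values : List String) (clusters : List Int) : Prop :=
  clusters ≠ [] ∧ values.length ≤ clusters.length
instance (values : List String) (clusters : List Int) : Decidable (Pre_fancy_cluster_representation values clusters) := by unfold Pre_fancy_cluster_representation; infer_instance

def pvWitness_fancy_cluster_representation : List String × List Int :=
  (["a", "b", "c"], [1, -1, 0])

def Spec_fancy_cluster_representation (values : List String) (clusters : List Int) (out : List (List String) × List String) : Prop := out = fancy_cluster_representation_alt values clusters
instance (values : List String) (clusters : List Int) (out : List (List String) × List String) : Decidable (Spec_fancy_cluster_representation values clusters out) := by unfold Spec_fancy_cluster_representation; infer_instance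

-- ===== CLAIM (what is proved, stated in full; the proofs are below) =====
def Claim_equal_fancy_cluster_representation : Prop := ∀ (values : List String) (clusters : List Int), Dom_fancy_cluster_representation values clusters → Pre_fancy_cluster_representation values clusters → Spec_fancy_cluster_representation values clusters (fancy_cluster_representation values clusters)

-- ===== LEMMAS AND PROOFS =====

-- B's buckets / noise restricted to the first n indices
def pvBkt (values : List String) (clusters : List Int) (nc n : Nat) : List (List String) :=
  (List.range nc).map (fun (i : Nat) =>
    ((List.range n).filter (fun j => clusters.getD j 0 == (i : Int))).map (fun j => values.getD j ""))

def pvNoi (values : List String) (clusters : List Int) (n : Nat) : List String :=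
  ((List.range n).filter (fun j => decide (clusters.getD j 0 < 0))).map (fun j => values.getD j "")

theorem pvAppendAt_length (l : List (List String)) (t : Nat) (v : String) :
    (pvAppendAt l t v).length = l.length := by
  induction l generalizing t with
  | nil => rfl
  | cons a tl ih => cases t <;> simp [pvAppendAt, ih]

theorem pvAppendAt_getElem (l : List (List String)) (t : Nat) (v : String) (i : Nat)
    (h : i < l.length) :
    (pvAppendAt l t v)[i]'(by rw [pvAppendAt_length]; exact h) =
      if i = t then l[i] ++ [v] else l[i] := by
  induction l generalizing t i with
  | nil => simp at h
  | cons a tl ih =>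
    cases t with
    | zero => cases i <;> simp [pvAppendAt]
    | succ t' =>
      cases i with
      | zero => simp [pvAppendAt]
      | succ i' => simpa [pvAppendAt] using ih t' i' (by simpa using h)

theorem pvAppendAt_map_range (k t : Nat) (f : Nat → List String) (v : String) :
    pvAppendAt ((List.range k).map f) t v
      = (List.range k).map (fun i => f i ++ if i = t then [v] else []) := by
  apply List.ext_getElem
  · simp [pvAppendAt_length]
  · intro i h1 h2
    have hik : i < k := by simpa [pvAppendAt_length] using h1
    rw [pvAppendAt_getElem _ _ _ i (by simpa using hik)]
    by_cases h : i = t <;> simp [h]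

theorem pvInitA_eq (nc : Nat) : pvInitA nc = List.replicate nc ([] : List String) := by
  have h : ∀ (k : Nat) (acc : List (List String)),
      (List.range k).foldl (fun acc _ => acc ++ [([] : List String)]) acc =
        acc ++ List.replicate k [] := by
    intro k
    induction k with
    | zero => intro acc; simp
    | succ n ih => intro acc; simp [List.range_succ, ih, List.replicate_succ']
  simpa [pvInitA] using h nc []

theorem pvLoop_eq (values : List String) (clusters : List Int) (m : Int)
    (hmax : PySem.List.max? clusters (fun x => x) = some m)
    (hlen : values.length ≤ clusters.length) :
    ∀ n, n ≤ values.length →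
      (List.range n).foldl (pvStepA values clusters) (pvInitA (m + 1).toNat, []) =
        (pvBkt values clusters (m + 1).toNat n, pvNoi values clusters n) := by
  intro n hn
  induction n with
  | zero =>
    simp [pvBkt, pvNoi, pvInitA_eq, List.map_const']
  | succ n ih =>
    have hn' : n ≤ values.length := Nat.le_of_succ_le hn
    rw [List.range_succ, List.foldl_append, ih hn']
    have hjc : n < clusters.length := lt_of_lt_of_le hn hlen
    have hmem : clusters.getD n 0 ∈ clusters := by
      rw [List.getD_eq_getElem _ _ hjc]; exact List.getElem_mem hjc
    have hle : clusters.getD n 0 ≤ m :=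
      PySem.List.max?_isMax hmax _ hmem
    have hbkt : pvBkt values clusters (m + 1).toNat (n + 1) =
        (List.range (m + 1).toNat).map (fun (i : Nat) =>
          (((List.range n).filter (fun j => clusters.getD j 0 == (i : Int))).map
              (fun j => values.getD j "")) ++
            (if clusters.getD n 0 == (i : Int) then [values.getD n ""] else [])) := by
      unfold pvBkt
      refine List.map_congr_left fun i _ => ?_
      rw [List.range_succ, List.filter_append, List.map_append]
      congr 1
      simp only [List.filter_cons, List.filter_nil]
      split <;> simp
    by_cases hx : 0 ≤ clusters.getD n 0
    · -- cluster branch: appended into bucket (clusters[n]).toNat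
      simp only [List.foldl_cons, List.foldl_nil, pvStepA]
      rw [if_pos hx]
      refine Prod.ext ?_ ?_ <;> dsimp only
      · rw [hbkt]
        unfold pvBkt
        rw [pvAppendAt_map_range]
        refine List.map_congr_left fun i hi => ?_
        congr 1
        by_cases hcase : i = (clusters.getD n 0).toNat
        · rw [if_pos hcase,
            if_pos (show (clusters.getD n 0 == (i : Int)) = true by
              simp only [beq_iff_eq]; omega)]
        · rw [if_neg hcase,
            if_neg (show ¬ (clusters.getD n 0 == (i : Int)) = true by
              simp only [beq_iff_eq]; omega)]
      · unfold pvNoi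
        rw [List.range_succ, List.filter_append, List.map_append]
        simp
        exact hx
    · -- noise branch: value appended to noise, buckets unchanged
      simp only [List.foldl_cons, List.foldl_nil, pvStepA]
      rw [if_neg hx]
      refine Prod.ext ?_ ?_ <;> dsimp only
      · rw [hbkt]
        unfold pvBkt
        refine List.map_congr_left fun i hi => ?_
        rw [if_neg (show ¬ (clusters.getD n 0 == (i : Int)) = true by
              simp only [beq_iff_eq]; omega), List.append_nil]
      · unfold pvNoi
        rw [List.range_succ, List.filter_append, List.map_append]
        have hx' : clusters[n]?.getD 0 < 0 := Int.lt_of_not_ge hx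
        simp [hx']

-- ===== VERDICT (by name: the statement is the Claim_ definition above) =====
theorem fancy_cluster_representation_spec : Claim_equal_fancy_cluster_representation := by
  intro values clusters _ hpre
  unfold Spec_fancy_cluster_representation
  obtain ⟨hne, hlen⟩ := hpre
  unfold fancy_cluster_representation fancy_cluster_representation_alt
  cases hmax : PySem.List.max? clusters (fun x => x) with
  | none => rfl
  | some m =>
    simp only []
    rw [pvLoop_eq values clusters m hmax hlen values.length (le_refl _)]
    rfl
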